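-- pv_equiv track=rewrite | github.com/dnlksnvv/CybrixSolutions | CS-VoiceAgent/second/Workers/agents/custom-plugins/streaming_sentencizer.py | _eager_punct_run_end
-- ===== SOURCE A (Python) =====
-- _EAGER_CLUSTER = frozenset("!?…")
--
-- def _eager_punct_run_end(buf: str, start: int) -> int:
--     """``buf[start]`` must be in ``_EAGER_CLUSTER``. Return exclusive end after ``[!?…]+`` and optional ``...``."""
--     n = len(buf)
--     j = start
--     while j < n and buf[j] in _EAGER_CLUSTER:
--         j += 1
--     if j + 3 <= n and buf[j : j + 3] == "...":
--         j += 3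
--     return j
-- ===== SOURCE B (Python) =====
-- def _eager_punct_run_end(buf: str, start: int) -> int:
--     # Single pass: simulate a small DFA for [!?...]*(?:\.\.\.)? with states
--     # 0 = punctuation run, 1..3 = number of '.' still needed is 4-state; `end`
--     # tracks the last accepted position.
--     end = start
--     state = 0
--     for j in range(start, len(buf)):
--         c = buf[j]
--         if state == 0:
--             if c in "!?\u2026":
--                 end = j + 1
--                 continue
--             state = 1
--         if c != ".":
--             break
--         if state == 3:
--             end = j + 1
--             break
--         state += 1
--     return end
-- ===== Notes on version B (the rewrite author's own statement) =====
-- stated objective: alternative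
-- what changed: A's two staged passes (a while loop consuming the !?… run, then a guarded fixed-length slice comparison against '...') are replaced by one single for-loop simulating a 4-state DFA for [!?…]*(?:\.\.\.)? that tracks the last accepted position.
-- outside the precondition, e.g. on _eager_punct_run_end('..', -2): A returns -2, B returns 1
import Mathlib
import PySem

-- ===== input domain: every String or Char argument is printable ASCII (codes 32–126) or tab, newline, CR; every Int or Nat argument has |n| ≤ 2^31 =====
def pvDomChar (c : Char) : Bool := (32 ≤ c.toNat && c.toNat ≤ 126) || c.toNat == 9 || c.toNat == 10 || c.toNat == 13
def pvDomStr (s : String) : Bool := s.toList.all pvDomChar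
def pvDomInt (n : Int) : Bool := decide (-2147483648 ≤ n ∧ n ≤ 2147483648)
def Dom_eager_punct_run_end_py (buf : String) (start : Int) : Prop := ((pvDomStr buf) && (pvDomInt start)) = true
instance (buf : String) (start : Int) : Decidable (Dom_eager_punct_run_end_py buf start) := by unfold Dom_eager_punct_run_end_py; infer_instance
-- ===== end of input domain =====

-- B replaces A's two-stage scan (while-loop over the cluster run, then a guarded fixed-length
-- slice comparison for "...") by a single for-loop simulating a 4-state DFA for [!?…]*(?:\.\.\.)?
-- that tracks the last accepted position (objective: alternative; same asymptotic cost).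


-- ===== PORT A =====
-- membership in _EAGER_CLUSTER = frozenset("!?…")
def pvClusterChar (c : Char) : Bool := c = '!' || c = '?' || c = '…'

-- the `while j < n and buf[j] in _EAGER_CLUSTER: j += 1` loop
def pvScanA (buf : List Char) (n j : Int) : Int :=
  if _h : j < n then
    match PySem.List.pyGet? buf j with
    | some c => if pvClusterChar c then pvScanA buf n (j + 1) else j
    | none => j   -- Python raises IndexError here (only reachable for j < -len(buf)); outside Pre_
  else j
termination_by (n - j).toNat
decreasing_by simp_wf; omega

def eager_punct_run_end_py (buf : String) (start : Int) : Int :=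
  let n : Int := (buf.toList.length : Int)
  let j := pvScanA buf.toList n start
  if j + 3 ≤ n ∧ PySem.List.slice buf.toList (some j) (some (j + 3)) = "...".toList
  then j + 3 else j

-- ===== PORT B =====
-- the `for j in range(start, len(buf))` DFA loop of Source B: state 0 = punctuation run,
-- states 2, 3 = one resp. two '.' consumed (state 1 is only momentary in the Python:
-- it is set and immediately incremented to 2 in the same iteration); `endv` = `end`.
def pvScanB (buf : List Char) (n j endv state : Int) : Int :=
  if _h : j < n then
    match PySem.List.pyGet? buf j with
    | some c =>
      if state = 0 then
        if pvClusterChar c then pvScanB buf n (j + 1) (j + 1) 0   -- end = j+1; continue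
        else
          -- state set to 1, then the shared dot tests run on the same character
          if c ≠ '.' then endv                                     -- break
          else pvScanB buf n (j + 1) endv 2                        -- state 1 ≠ 3, state += 1
      else
        if c ≠ '.' then endv                                       -- break
        else if state = 3 then j + 1                               -- end = j+1; break
        else pvScanB buf n (j + 1) endv (state + 1)
    | none => endv   -- Python raises IndexError here (only reachable for j < -len(buf)); outside Pre_
  else endv
termination_by (n - j).toNat
decreasing_by all_goals simp_wf; omega

def eager_punct_run_end_py_alt (buf : String) (start : Int) : Int :=
  pvScanB buf.toList (buf.toList.length : Int) start start 0

-- ===== PRECONDITION & SPEC =====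
-- Pre_ excludes negative start, where A's value (or IndexError for start < -len(buf)) comes from
-- Python's accidental negative-index wraparound on a corner the docstring forbids (buf[start] must
-- be an eager-cluster character), and B's per-character wraparound value is an equally accidental
-- alternative (A's slice clamps across 0 where B's indexing wraps, so the two defensible accidents differ).
def Pre_eager_punct_run_end_py (buf : String) (start : Int) : Prop := 0 ≤ start
instance (buf : String) (start : Int) : Decidable (Pre_eager_punct_run_end_py buf start) := by unfold Pre_eager_punct_run_end_py; infer_instance

def pvWitness_eager_punct_run_end_py : String × Int := ("!?...", 0)

def Spec_eager_punct_run_end_py (buf : String) (start : Int) (out : Int) : Prop := out = eager_punct_run_end_py_alt buf start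
instance (buf : String) (start : Int) (out : Int) : Decidable (Spec_eager_punct_run_end_py buf start out) := by unfold Spec_eager_punct_run_end_py; infer_instance

-- ===== CLAIM (what is proved, stated in full; the proofs are below) =====
def Claim_equal_eager_punct_run_end_py : Prop := ∀ (buf : String) (start : Int), Dom_eager_punct_run_end_py buf start → Pre_eager_punct_run_end_py buf start → Spec_eager_punct_run_end_py buf start (eager_punct_run_end_py buf start)

-- ===== LEMMAS AND PROOFS =====

-- for 0 ≤ k < len, indexing returns the character there and drop peels it off
lemma pvGet_drop (buf : List Char) (k : Int) (hk : 0 ≤ k) (hlt : k < (buf.length : Int)) :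
    ∃ c, PySem.List.pyGet? buf k = some c ∧ buf.drop k.toNat = c :: buf.drop (k.toNat + 1) := by
  have hlt' : k.toNat < buf.length := by omega
  refine ⟨buf[k.toNat], ?_, List.drop_eq_getElem_cons hlt'⟩
  simp only [PySem.List.pyGet?, PySem.List.pyIdx?, if_pos hk, if_pos hlt]
  simp [List.getElem?_eq_getElem hlt']

-- the slice buf[j:j+3] for 0 ≤ j is the first three characters after position j
lemma pvSlice3 (buf : List Char) (j : Int) (hj : 0 ≤ j) :
    PySem.List.slice buf (some j) (some (j + 3)) = (buf.drop j.toNat).take 3 := by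
  rw [PySem.List.slice_toNat buf hj (by omega : (0:Int) ≤ j + 3)]
  have h3 : (j + 3).toNat - j.toNat = 3 := by omega
  rw [h3]

-- B's DFA loop started at j computes exactly A's two stages: the cluster-run end j0, plus 3 when
-- the three characters at j0 are "..." (A's guarded slice comparison).
lemma pvScanB_eq (buf : List Char) (j : Int) (hj : 0 ≤ j) :
    pvScanB buf (buf.length : Int) j j 0 =
      (if pvScanA buf (buf.length : Int) j + 3 ≤ (buf.length : Int) ∧
          PySem.List.slice buf (some (pvScanA buf (buf.length : Int) j))
            (some (pvScanA buf (buf.length : Int) j + 3)) = "...".toList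
       then pvScanA buf (buf.length : Int) j + 3 else pvScanA buf (buf.length : Int) j) := by
  have hdots : "...".toList = ['.', '.', '.'] := rfl
  rw [pvScanB]
  by_cases h : j < (buf.length : Int)
  · obtain ⟨c, hget, hd0⟩ := pvGet_drop buf j hj h
    rw [dif_pos h, hget]
    dsimp only
    by_cases hc : pvClusterChar c
    · -- run continues: both sides step to j+1
      have hA : pvScanA buf (buf.length : Int) j = pvScanA buf (buf.length : Int) (j + 1) := by
        rw [pvScanA, dif_pos h, hget]; dsimp only; rw [if_pos hc]
      rw [if_pos rfl, if_pos hc, hA]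
      exact pvScanB_eq buf (j + 1) (by omega)
    · -- run ends here: A's value is j; B runs the dot phase
      have hA : pvScanA buf (buf.length : Int) j = j := by
        rw [pvScanA, dif_pos h, hget]; dsimp only; rw [if_neg hc]
      rw [if_pos rfl, if_neg hc, hA]
      have hsl := pvSlice3 buf j hj
      by_cases hdot : c = '.'
      · rw [if_neg (by simpa using hdot)]
        -- first dot consumed; second character
        rw [pvScanB]
        by_cases h1 : j + 1 < (buf.length : Int)
        · obtain ⟨c1, hget1, hd1⟩ := pvGet_drop buf (j + 1) (by omega) h1
          have ht1 : (j + 1).toNat = j.toNat + 1 := by omega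
          rw [ht1] at hd1
          rw [dif_pos h1, hget1]
          dsimp only
          rw [if_neg (by norm_num)]
          by_cases hdot1 : c1 = '.'
          · rw [if_neg (by simpa using hdot1)]
            rw [if_neg (by norm_num)]
            -- second dot consumed; third character
            rw [pvScanB]
            by_cases h2 : j + 1 + 1 < (buf.length : Int)
            · obtain ⟨c2, hget2, hd2⟩ := pvGet_drop buf (j + 1 + 1) (by omega) h2
              have ht2 : (j + 1 + 1).toNat = j.toNat + 1 + 1 := by omega
              rw [ht2] at hd2
              rw [dif_pos h2, hget2]
              dsimp only
              rw [if_neg (by norm_num)]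
              by_cases hdot2 : c2 = '.'
              · rw [if_neg (by simpa using hdot2), if_pos (by norm_num)]
                rw [if_pos ⟨by omega, by rw [hsl, hd0, hd1, hd2, hdots, hdot, hdot1, hdot2]; rfl⟩]
                omega
              · rw [if_pos (by simpa using hdot2)]
                rw [if_neg]
                rintro ⟨-, heq⟩
                rw [hsl, hd0, hd1, hd2, hdots] at heq
                simp only [List.take_succ_cons, List.take_zero, List.cons.injEq] at heq
                exact hdot2 heq.2.2.1
            · rw [dif_neg h2]
              rw [if_neg (by rintro ⟨h3, -⟩; omega)]
          · rw [if_pos (by simpa using hdot1)]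
            rw [if_neg]
            rintro ⟨-, heq⟩
            rw [hsl, hd0, hd1, hdots] at heq
            simp only [List.take_succ_cons, List.cons.injEq] at heq
            exact hdot1 heq.2.1
        · rw [dif_neg h1]
          rw [if_neg (by rintro ⟨h3, -⟩; omega)]
      · rw [if_pos (by simpa using hdot)]
        rw [if_neg]
        rintro ⟨-, heq⟩
        rw [hsl, hd0, hdots] at heq
        simp only [List.take_succ_cons, List.cons.injEq] at heq
        exact hdot heq.1
  · have hA : pvScanA buf (buf.length : Int) j = j := by rw [pvScanA, dif_neg h]
    rw [dif_neg h, hA]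
    rw [if_neg (by rintro ⟨h3, -⟩; omega)]
termination_by (buf.length - j.toNat)
decreasing_by omega

-- ===== VERDICT (by name: the statement is the Claim_ definition above) =====
theorem eager_punct_run_end_py_spec : Claim_equal_eager_punct_run_end_py := by
  intro buf start _hdom hpre
  unfold Spec_eager_punct_run_end_py eager_punct_run_end_py eager_punct_run_end_py_alt
  dsimp only
  exact (pvScanB_eq buf.toList start hpre).symm
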